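-- pv_equiv track=rewrite | github.com/HanCiHu/Algorithm | atCoder/2024.02.10/c.py | func
-- ===== SOURCE A (Python) =====
-- from collections import defaultdict
--
-- dp = defaultdict(int)
--
-- def func(n):
--   if dp[n] > 0: return dp[n]
--   if n == 1: return 0
--   if n == 2: return 2
--   if n == 3: return 5
--
--   if n % 2 == 1:
--     dp[n] = n // 2 + n // 2 + 1 + func(n // 2) + func(n // 2 + 1)
--   else:
--     dp[n] += n +  2 * func(n // 2)
--
--   return dp[n]
-- ===== SOURCE B (Python) =====
-- def func(n):
--     # closed form: func(n) = n*ceil(log2 n) - 2**ceil(log2 n) + n  for n >= 1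
--     k, p = 0, 1
--     while p < n:
--         p *= 2
--         k += 1
--     return n * k - p + n
-- ===== Notes on version B (the rewrite author's own statement) =====
-- stated objective: simpler
-- what changed: Replaced the memoized halving recursion and its global dict by the closed form n*ceil(log2 n) - 2**ceil(log2 n) + n, computed with a tiny doubling loop.
import Mathlib
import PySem

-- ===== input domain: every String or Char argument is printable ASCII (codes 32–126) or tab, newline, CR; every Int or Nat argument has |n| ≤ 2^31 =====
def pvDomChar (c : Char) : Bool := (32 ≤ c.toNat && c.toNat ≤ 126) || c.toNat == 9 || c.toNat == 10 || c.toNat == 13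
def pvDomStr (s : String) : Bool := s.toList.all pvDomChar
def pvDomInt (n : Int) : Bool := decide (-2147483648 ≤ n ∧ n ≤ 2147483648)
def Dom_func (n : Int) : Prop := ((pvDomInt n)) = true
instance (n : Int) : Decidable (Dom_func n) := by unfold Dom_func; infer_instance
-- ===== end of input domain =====

-- B replaces the memoized halving recursion by the closed form n*⌈log2 n⌉ - 2^⌈log2 n⌉ + n
-- (a short doubling loop); equivalence is about the RETURN value only (A also fills a global memo dict,
-- which never changes the returned value).

-- ===== PORT A =====
-- literal port of A's recursion; the global memo dict `dp` only caches already-computed values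
-- (it never alters the value returned), so the port computes the same pure recursion.
-- The `4 ≤ n` guard only makes the recursion total: for n ≤ 0 Python A recurses forever
-- (RecursionError), excluded by Pre_func.
def func (n : Int) : Int :=
  if n = 1 then 0
  else if n = 2 then 2
  else if n = 3 then 5
  else if h4 : 4 ≤ n then
    if PySem.Int.mod n 2 = 1 then
      PySem.Int.floordiv n 2 + PySem.Int.floordiv n 2 + 1
        + func (PySem.Int.floordiv n 2) + func (PySem.Int.floordiv n 2 + 1)
    else
      n + 2 * func (PySem.Int.floordiv n 2)
  else 0
termination_by n.toNat
decreasing_by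
  · rw [PySem.Int.floordiv_eq_ediv_of_pos (by omega : (0:Int) < 2)]; omega
  · rw [PySem.Int.floordiv_eq_ediv_of_pos (by omega : (0:Int) < 2)]; omega
  · rw [PySem.Int.floordiv_eq_ediv_of_pos (by omega : (0:Int) < 2)]; omega

-- ===== PORT B =====
-- the `0 < p` conjunct only makes the loop total; B always starts it at p = 1
def funcAltGo (n p k : Int) : Int × Int :=
  if p < n ∧ 0 < p then funcAltGo n (p * 2) (k + 1) else (k, p)
termination_by (n - p).toNat
decreasing_by omega

def func_alt (n : Int) : Int :=
  let r := funcAltGo n 1 0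
  n * r.1 - r.2 + n

-- ===== PRECONDITION & SPEC =====
-- Pre_ excludes n ≤ 0, on which Python A recurses forever and dies with RecursionError.
def Pre_func (n : Int) : Prop := 1 ≤ n
instance (n : Int) : Decidable (Pre_func n) := by unfold Pre_func; infer_instance
def pvWitness_func : Int := 5

def Spec_func (n : Int) (out : Int) : Prop := out = func_alt n
instance (n : Int) (out : Int) : Decidable (Spec_func n out) := by unfold Spec_func; infer_instance

-- ===== CLAIM (what is proved, stated in full; the proofs are below) =====
def Claim_equal_func : Prop := ∀ (n : Int), Dom_func n → Pre_func n → Spec_func n (func n)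

-- ===== LEMMAS AND PROOFS =====

-- the closed-form value, over Nat arguments
def pvF (m : Nat) : Int := (m : Int) * (Nat.clog 2 m : Int) - 2 ^ (Nat.clog 2 m) + (m : Int)

lemma pvGo_spec (n : Int) (hn : 1 ≤ n) :
    ∀ (d j : Nat), Nat.clog 2 n.toNat = j + d →
      funcAltGo n ((2 : Int) ^ j) (j : Int)
        = ((Nat.clog 2 n.toNat : Int), (2 : Int) ^ (Nat.clog 2 n.toNat)) := by
  intro d
  induction d with
  | zero =>
    intro j hj
    have hle : n.toNat ≤ 2 ^ j :=
      (Nat.clog_le_iff_le_pow (by norm_num)).1 (by omega)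
    have hle' : n ≤ (2 : Int) ^ j := by
      have := (Int.toNat_le).1 (le_refl n.toNat)
      calc n = (n.toNat : Int) := by omega
        _ ≤ ((2 ^ j : Nat) : Int) := by exact_mod_cast hle
        _ = (2 : Int) ^ j := by push_cast; ring
    rw [funcAltGo]
    rw [if_neg (by rintro ⟨h, -⟩; omega)]
    simp [hj]
  | succ d ih =>
    intro j hj
    have hgt : 2 ^ j < n.toNat := by
      by_contra h
      have : Nat.clog 2 n.toNat ≤ j := (Nat.clog_le_iff_le_pow (by norm_num)).2 (by omega)
      omega
    have hgt' : (2 : Int) ^ j < n := by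
      calc (2 : Int) ^ j = ((2 ^ j : Nat) : Int) := by push_cast; ring
        _ < (n.toNat : Int) := by exact_mod_cast hgt
        _ = n := by omega
    rw [funcAltGo]
    rw [if_pos ⟨hgt', by positivity⟩]
    have h2 : (2 : Int) ^ j * 2 = (2 : Int) ^ (j + 1) := by ring
    have hk : (j : Int) + 1 = ((j + 1 : Nat) : Int) := by push_cast; ring
    rw [h2, hk]
    exact ih (j + 1) (by omega)

lemma pvAlt_eq (n : Int) (hn : 1 ≤ n) : func_alt n = pvF n.toNat := by
  have h := pvGo_spec n hn (Nat.clog 2 n.toNat) 0 (by omega)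
  simp only [pow_zero, Nat.cast_zero] at h
  simp only [func_alt, h, pvF]
  have : (n.toNat : Int) = n := by omega
  rw [this]

-- the recurrence pvF m = m + pvF ⌊m/2⌋ + pvF ⌈m/2⌉ for m ≥ 2
lemma pvF_rec (m : Nat) (hm : 2 ≤ m) :
    pvF m = (m : Int) + pvF (m / 2) + pvF ((m + 1) / 2) := by
  have hcm : Nat.clog 2 m = Nat.clog 2 ((m + 1) / 2) + 1 := by
    rw [Nat.clog_of_two_le (by norm_num) hm]
    have h : (m + 2 - 1) / 2 = (m + 1) / 2 := by omega
    rw [h]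
  by_cases hpar : m % 2 = 0
  · -- m even: both halves equal
    have hfe : (m + 1) / 2 = m / 2 := by omega
    rw [hfe] at hcm ⊢
    have hm2 : (m : Int) = 2 * ((m / 2 : Nat) : Int) := by omega
    simp only [pvF, hcm, pow_succ, Nat.cast_add, Nat.cast_one]
    rw [hm2]
    ring
  · -- m odd
    have hba : (m + 1) / 2 = m / 2 + 1 := by omega
    rw [hba] at hcm ⊢
    have ha1 : 1 ≤ m / 2 := by omega
    have hub : Nat.clog 2 (m / 2 + 1) ≤ Nat.clog 2 (m / 2) + 1 := by
      have h2a : Nat.clog 2 (2 * (m / 2)) = Nat.clog 2 (m / 2) + 1 := by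
        rw [Nat.clog_of_two_le (by norm_num) (by omega)]
        have h : (2 * (m / 2) + 2 - 1) / 2 = m / 2 := by omega
        rw [h]
      calc Nat.clog 2 (m / 2 + 1) ≤ Nat.clog 2 (2 * (m / 2)) :=
            Nat.clog_mono_right 2 (by omega)
        _ = Nat.clog 2 (m / 2) + 1 := h2a
    have hmono : Nat.clog 2 (m / 2) ≤ Nat.clog 2 (m / 2 + 1) :=
      Nat.clog_mono_right 2 (by omega)
    by_cases heq : Nat.clog 2 (m / 2 + 1) = Nat.clog 2 (m / 2)
    · -- same ceiling log for both halves
      simp only [pvF, hcm, heq, pow_succ, Nat.cast_add, Nat.cast_one]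
      have hmab : (m : Int) = ((m / 2 : Nat) : Int) + (((m / 2 : Nat) : Int) + 1) := by omega
      rw [hmab]
      ring
    · -- m / 2 + 1 crosses a power of two: m / 2 = 2 ^ clog 2 (m / 2)
      have hcb : Nat.clog 2 (m / 2 + 1) = Nat.clog 2 (m / 2) + 1 := by omega
      have hale : m / 2 ≤ 2 ^ Nat.clog 2 (m / 2) := Nat.le_pow_clog (by norm_num) _
      have hbgt : 2 ^ Nat.clog 2 (m / 2) < m / 2 + 1 := by
        by_contra h
        have : Nat.clog 2 (m / 2 + 1) ≤ Nat.clog 2 (m / 2) :=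
          (Nat.clog_le_iff_le_pow (by norm_num)).2 (by omega)
        omega
      have hapow : 2 ^ Nat.clog 2 (m / 2) = m / 2 := by omega
      simp only [pvF, hcm, hcb, pow_succ, Nat.cast_add, Nat.cast_one]
      have hA : ((2 : Int)) ^ Nat.clog 2 (m / 2) = ((m / 2 : Nat) : Int) := by
        have h := congrArg (fun x : Nat => (x : Int)) hapow
        push_cast at h
        exact h
      have hmi : (m : Int) = 2 * ((m / 2 : Nat) : Int) + 1 := by omega
      rw [hmi, hA]
      ring

-- func_alt satisfies A's two branch equations (Int side)
lemma pvAlt_even (n : Int) (h2 : 2 ≤ n) (he : n % 2 = 0) :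
    func_alt n = n + 2 * func_alt (n / 2) := by
  rw [pvAlt_eq n (by omega), pvAlt_eq (n / 2) (by omega)]
  have h1 : (n / 2).toNat = n.toNat / 2 := by omega
  have h3 : (n.toNat + 1) / 2 = n.toNat / 2 := by omega
  have := pvF_rec n.toNat (by omega)
  rw [h3] at this
  rw [h1, this]
  have : ((n.toNat : Int)) = n := by omega
  rw [this]
  ring

lemma pvAlt_odd (n : Int) (h2 : 3 ≤ n) (ho : n % 2 = 1) :
    func_alt n = n + func_alt (n / 2) + func_alt (n / 2 + 1) := by
  rw [pvAlt_eq n (by omega), pvAlt_eq (n / 2) (by omega), pvAlt_eq (n / 2 + 1) (by omega)]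
  have h1 : (n / 2).toNat = n.toNat / 2 := by omega
  have h2' : (n / 2 + 1).toNat = (n.toNat + 1) / 2 := by omega
  have := pvF_rec n.toNat (by omega)
  rw [h1, h2', this]
  have : ((n.toNat : Int)) = n := by omega
  rw [this]

lemma pvAlt_one : func_alt 1 = 0 := by
  rw [func_alt, funcAltGo]; norm_num

lemma pvAlt_two : func_alt 2 = 2 := by
  rw [func_alt, funcAltGo, funcAltGo]; norm_num

lemma pvAlt_three : func_alt 3 = 5 := by
  rw [func_alt, funcAltGo, funcAltGo, funcAltGo]; norm_num

lemma pvAgree : ∀ (N : Nat) (n : Int), n.toNat ≤ N → 1 ≤ n → func n = func_alt n := by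
  intro N
  induction N with
  | zero => intro n h h1; omega
  | succ N ih =>
    intro n h h1
    rw [func]
    by_cases e1 : n = 1
    · rw [if_pos e1, e1, pvAlt_one]
    rw [if_neg e1]
    by_cases e2 : n = 2
    · rw [if_pos e2, e2, pvAlt_two]
    rw [if_neg e2]
    by_cases e3 : n = 3
    · rw [if_pos e3, e3, pvAlt_three]
    rw [if_neg e3]
    have h4 : 4 ≤ n := by omega
    rw [dif_pos h4]
    rw [PySem.Int.floordiv_eq_ediv_of_pos (by omega : (0:Int) < 2)]
    have ihh : func (n / 2) = func_alt (n / 2) := ih (n / 2) (by omega) (by omega)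
    by_cases hodd : PySem.Int.mod n 2 = 1
    · rw [if_pos hodd]
      rw [PySem.Int.mod_eq_emod_of_pos (by omega : (0:Int) < 2)] at hodd
      have ihh2 : func (n / 2 + 1) = func_alt (n / 2 + 1) := ih (n / 2 + 1) (by omega) (by omega)
      rw [ihh, ihh2, pvAlt_odd n (by omega) hodd]
      have : n / 2 + n / 2 + 1 = n := by omega
      omega
    · rw [if_neg hodd]
      rw [PySem.Int.mod_eq_emod_of_pos (by omega : (0:Int) < 2)] at hodd
      rw [ihh, pvAlt_even n (by omega) (by omega)]

-- ===== VERDICT (by name: the statement is the Claim_ definition above) =====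
theorem func_spec : Claim_equal_func := by
  intro n _ hpre
  unfold Spec_func
  exact pvAgree n.toNat n (le_refl _) hpre
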